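-- pv_equiv track=rewrite | github.com/airstandley/AdventofCode | 2019/Python/Day_10/visibility_graph_solution.py | find_best_station_location
-- ===== SOURCE A (Python) =====
-- def find_best_station_location(asteroid_visibility_graph):
--     max_visible_asteroids = 0
--     best_locations = []
--     for node, edges in asteroid_visibility_graph.items():
--         visible_asteroids = len(edges)
--         if visible_asteroids > max_visible_asteroids:
--             max_visible_asteroids = visible_asteroids
--             best_locations = [node]
--         elif visible_asteroids == max_visible_asteroids:
--             best_locations.append(node)
--     return best_locations, max_visible_asteroids
-- ===== SOURCE B (Python) =====
-- def find_best_station_location(asteroid_visibility_graph):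
--     if not asteroid_visibility_graph:
--         return [], 0
--     m = max(len(edges) for edges in asteroid_visibility_graph.values())
--     best = [node for node, edges in asteroid_visibility_graph.items() if len(edges) == m]
--     return best, m
-- ===== Notes on version B (the rewrite author's own statement) =====
-- stated objective: simpler
-- what changed: Replaces the single running-max-with-ties loop by an explicit empty-dict case, a max() pass over the edge counts, and a filter pass collecting the nodes that attain it.
import Mathlib
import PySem

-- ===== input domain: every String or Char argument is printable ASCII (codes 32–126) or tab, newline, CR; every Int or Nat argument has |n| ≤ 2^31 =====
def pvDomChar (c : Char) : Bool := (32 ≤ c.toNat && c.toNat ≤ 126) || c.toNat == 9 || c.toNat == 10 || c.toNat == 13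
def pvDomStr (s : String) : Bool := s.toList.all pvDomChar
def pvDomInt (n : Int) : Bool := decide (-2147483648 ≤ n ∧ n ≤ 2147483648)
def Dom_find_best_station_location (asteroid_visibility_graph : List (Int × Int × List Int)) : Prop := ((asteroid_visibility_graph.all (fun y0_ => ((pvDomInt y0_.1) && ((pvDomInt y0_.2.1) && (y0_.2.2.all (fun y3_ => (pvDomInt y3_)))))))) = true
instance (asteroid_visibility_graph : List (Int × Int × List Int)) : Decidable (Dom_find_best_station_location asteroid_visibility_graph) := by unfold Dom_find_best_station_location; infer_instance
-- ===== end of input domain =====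

-- B replaces A's single running-max-with-ties loop by an empty case, a max pass and a filter pass (objective: simpler).

-- ===== PORT A =====
-- the for-loop of A over the dict's items, carrying (best_locations, max_visible_asteroids)
def pvLoopA : List (Int × Int × List Int) → Int → List (Int × Int) → (List (Int × Int)) × Int
  | [], m, best => (best, m)
  | e :: t, m, best =>
    let v : Int := e.2.2.length
    if v > m then pvLoopA t v [(e.1, e.2.1)]
    else if v = m then pvLoopA t m (best ++ [(e.1, e.2.1)])
    else pvLoopA t m best

def find_best_station_location (asteroid_visibility_graph : List (Int × Int × List Int)) : (List (Int × Int)) × Int :=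
  pvLoopA asteroid_visibility_graph 0 []

-- ===== PORT B =====
def find_best_station_location_alt (asteroid_visibility_graph : List (Int × Int × List Int)) : (List (Int × Int)) × Int :=
  match asteroid_visibility_graph with
  | [] => ([], 0)
  | h :: t =>
    -- m = max(len(edges) for edges in graph.values())
    let m : Int := t.foldl (fun acc e => max acc (e.2.2.length : Int)) ((h.2.2.length : Int))
    -- best = [node for node, edges in graph.items() if len(edges) == m]
    let best := ((h :: t).filter (fun e => (e.2.2.length : Int) = m)).map (fun e => (e.1, e.2.1))
    (best, m)

-- ===== PRECONDITION & SPEC =====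
def Spec_find_best_station_location (asteroid_visibility_graph : List (Int × Int × List Int)) (out : (List (Int × Int)) × Int) : Prop := out = find_best_station_location_alt asteroid_visibility_graph
instance (asteroid_visibility_graph : List (Int × Int × List Int)) (out : (List (Int × Int)) × Int) : Decidable (Spec_find_best_station_location asteroid_visibility_graph out) := by unfold Spec_find_best_station_location; infer_instance

-- ===== CLAIM (what is proved, stated in full; the proofs are below) =====
def Claim_equal_find_best_station_location : Prop := ∀ (asteroid_visibility_graph : List (Int × Int × List Int)), Dom_find_best_station_location asteroid_visibility_graph → Spec_find_best_station_location asteroid_visibility_graph (find_best_station_location asteroid_visibility_graph)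

-- ===== LEMMAS AND PROOFS =====

-- running maximum of edge-counts starting from m
def pvMx (g : List (Int × Int × List Int)) (m : Int) : Int :=
  g.foldl (fun acc e => max acc (e.2.2.length : Int)) m

lemma pvMx_cons (e : Int × Int × List Int) (t : List (Int × Int × List Int)) (m : Int) :
    pvMx (e :: t) m = pvMx t (max m (e.2.2.length : Int)) := rfl

lemma pvMx_le (g : List (Int × Int × List Int)) (m : Int) : m ≤ pvMx g m := by
  induction g generalizing m with
  | nil => simp [pvMx]
  | cons e t ih =>
    rw [pvMx_cons]
    exact le_trans (le_max_left _ _) (ih _)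

-- closed form of A's loop
set_option maxRecDepth 4000 in
lemma pvLoopA_eq (g : List (Int × Int × List Int)) (m : Int) (best : List (Int × Int)) :
    pvLoopA g m best =
      ((if pvMx g m = m then best else []) ++
        (g.filter (fun e => (e.2.2.length : Int) = pvMx g m)).map (fun e => (e.1, e.2.1)),
       pvMx g m) := by
  induction g generalizing m best with
  | nil => simp [pvLoopA, pvMx]
  | cons e t ih =>
    have hle := pvMx_le t (max m (e.2.2.length : Int))
    rw [pvMx_cons]
    by_cases h1 : (e.2.2.length : Int) > m
    · rw [max_eq_right (le_of_lt h1)] at hle ⊢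
      simp only [pvLoopA, if_pos h1, ih]
      generalize pvMx t ((e.2.2.length : Int)) = M at hle ⊢
      have hne : ¬ M = m := by omega
      by_cases h2 : (e.2.2.length : Int) = M
      · simp [hne, h2]
      · simp [hne, h2]
        omega
    · rw [max_eq_left (by omega)] at hle ⊢
      by_cases h2 : (e.2.2.length : Int) = m
      · simp only [pvLoopA, if_neg h1, if_pos h2, ih]
        generalize pvMx t m = M at hle ⊢
        by_cases h3 : M = m
        · simp [h3, h2]
        · have hne : ¬ (e.2.2.length : Int) = M := by omega
          simp [h3, hne]
      · simp only [pvLoopA, if_neg h1, if_neg h2, ih]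
        generalize pvMx t m = M at hle ⊢
        have hne : ¬ (e.2.2.length : Int) = M := by omega
        simp [hne]

-- ===== VERDICT (by name: the statement is the Claim_ definition above) =====
theorem find_best_station_location_spec : Claim_equal_find_best_station_location := by
  intro g _
  show find_best_station_location g = find_best_station_location_alt g
  cases g with
  | nil => rfl
  | cons h t =>
    have hmx : pvMx (h :: t) 0 = pvMx t ((h.2.2.length : Int)) := by
      rw [pvMx_cons, max_eq_right (by positivity)]
    rw [find_best_station_location, pvLoopA_eq, hmx]
    simp [pvMx, find_best_station_location_alt]
    rfl
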